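-- pv_equiv track=rewrite | github.com/BenHND/Janus-Agent | janus/vision/visual_grounding_engine.py | _classify_element_type
-- ===== SOURCE A (Python) =====
-- def _classify_element_type(label: str, text: str) -> str:
--     """
--     Classify element type based on object detection label and text
--
--     Args:
--         label: Object detection label
--         text: Text content
--
--     Returns:
--         Element type (button, link, textfield, etc.)
--     """
--     label_lower = label.lower()
--     text_lower = text.lower() if text else ""
--
--     # Button indicators
--     if "button" in label_lower or any(
--         word in text_lower for word in ["click", "submit", "send", "ok", "cancel", "search"]
--     ):
--         return "button"
--
--     # Link indicators
--     if "link" in label_lower or "anchor" in label_lower: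
--         return "link"
--
--     # Input field indicators
--     if (
--         "input" in label_lower
--         or "text" in label_lower
--         or "field" in label_lower
--         or any(word in text_lower for word in ["email", "password", "username", "search"])
--     ):
--         return "textfield"
--
--     # Checkbox/radio indicators
--     if "checkbox" in label_lower or "radio" in label_lower:
--         return "checkbox"
--
--     # Default to label as element type
--     return "label"
-- ===== SOURCE B (Python) =====
-- # Flat keyword table: each keyword maps to (haystack, priority). The result is
-- # the TYPE of the minimum priority among matched keywords (min-fold, no early
-- # return), priorities ordered exactly as A's rule order; 'search' appears for
-- # both button (0) and textfield (2), the min keeps it 'button'.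
-- KEYWORDS = [
--     ("button", True, 0), ("click", False, 0), ("submit", False, 0),
--     ("send", False, 0), ("ok", False, 0), ("cancel", False, 0),
--     ("search", False, 0),
--     ("link", True, 1), ("anchor", True, 1),
--     ("input", True, 2), ("text", True, 2), ("field", True, 2),
--     ("email", False, 2), ("password", False, 2), ("username", False, 2),
--     ("search", False, 2),
--     ("checkbox", True, 3), ("radio", True, 3),
-- ]
--
-- TYPES = ["button", "link", "textfield", "checkbox", "label"]
--
--
-- def _classify_element_type(label: str, text: str) -> str:
--     label_lower = label.lower()
--     text_lower = (text or "").lower()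
--     best = 4
--     for kw, in_label, pri in KEYWORDS:
--         hay = label_lower if in_label else text_lower
--         if pri < best and kw in hay:
--             best = pri
--     return TYPES[best]
-- ===== Notes on version B (the rewrite author's own statement) =====
-- stated objective: alternative
-- what changed: Replaces the four ordered if-branches with an early return by a flat keyword->priority table and a min-fold over all keywords: the answer is TYPES[min priority among matched keywords], default 4 = 'label'.
import Mathlib
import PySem

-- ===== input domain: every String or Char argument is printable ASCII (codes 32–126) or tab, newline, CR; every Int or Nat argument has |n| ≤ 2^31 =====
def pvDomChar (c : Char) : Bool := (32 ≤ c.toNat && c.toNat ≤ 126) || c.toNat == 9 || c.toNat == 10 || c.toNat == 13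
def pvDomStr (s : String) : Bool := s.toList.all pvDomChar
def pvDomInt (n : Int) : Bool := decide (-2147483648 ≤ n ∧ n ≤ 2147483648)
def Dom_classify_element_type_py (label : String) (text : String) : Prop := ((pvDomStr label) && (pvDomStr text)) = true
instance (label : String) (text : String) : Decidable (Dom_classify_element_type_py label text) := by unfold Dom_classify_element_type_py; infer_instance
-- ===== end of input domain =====

-- B replaces A's four ordered if-branches by a min-fold over a flat keyword→priority table (objective: alternative).

-- ===== PORT A =====
def classify_element_type_py (label : String) (text : String) : String :=
  let label_lower := PySem.Str.lower label
  let text_lower := if PySem.Str.len text ≠ 0 then PySem.Str.lower text else ""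
  if PySem.Str.isIn "button" label_lower ||
     (["click", "submit", "send", "ok", "cancel", "search"].any
        (fun word => PySem.Str.isIn word text_lower)) then
    "button"
  else if PySem.Str.isIn "link" label_lower || PySem.Str.isIn "anchor" label_lower then
    "link"
  else if PySem.Str.isIn "input" label_lower ||
          PySem.Str.isIn "text" label_lower ||
          PySem.Str.isIn "field" label_lower ||
          (["email", "password", "username", "search"].any
             (fun word => PySem.Str.isIn word text_lower)) then
    "textfield"
  else if PySem.Str.isIn "checkbox" label_lower || PySem.Str.isIn "radio" label_lower then
    "checkbox"
  else
    "label"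

-- ===== PORT B =====
-- flat table: (keyword, search-in-label?, priority); result = TYPES[min matched priority]
def classifyKeywords : List (String × Bool × Nat) :=
  [ ("button", true, 0), ("click", false, 0), ("submit", false, 0),
    ("send", false, 0), ("ok", false, 0), ("cancel", false, 0),
    ("search", false, 0),
    ("link", true, 1), ("anchor", true, 1),
    ("input", true, 2), ("text", true, 2), ("field", true, 2),
    ("email", false, 2), ("password", false, 2), ("username", false, 2),
    ("search", false, 2),
    ("checkbox", true, 3), ("radio", true, 3) ]

def classifyTypes : List String := ["button", "link", "textfield", "checkbox", "label"]

def classify_element_type_py_alt (label : String) (text : String) : String :=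
  let label_lower := PySem.Str.lower label
  let text_lower := PySem.Str.lower (if PySem.Str.len text ≠ 0 then text else "")
  let best := classifyKeywords.foldl
    (fun best kft =>
      if kft.2.2 < best && PySem.Str.isIn kft.1 (if kft.2.1 then label_lower else text_lower)
      then kft.2.2 else best) 4
  classifyTypes.getD best "label"

-- ===== PRECONDITION & SPEC =====
def Spec_classify_element_type_py (label : String) (text : String) (out : String) : Prop := out = classify_element_type_py_alt label text
instance (label : String) (text : String) (out : String) : Decidable (Spec_classify_element_type_py label text out) := by unfold Spec_classify_element_type_py; infer_instance

-- ===== CLAIM (what is proved, stated in full; the proofs are below) =====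
def Claim_equal_classify_element_type_py : Prop := ∀ (label : String) (text : String), Dom_classify_element_type_py label text → Spec_classify_element_type_py label text (classify_element_type_py label text)

-- ===== LEMMAS AND PROOFS =====

-- does keyword k match (in the label haystack if k.2.1, else in the text haystack)?
def pvMatch (fL fT : String → Bool) (k : String × Bool × Nat) : Bool :=
  if k.2.1 then fL k.1 else fT k.1

-- one step of B's min-fold, abstracted over the two membership tests
def pvStep (fL fT : String → Bool) (best : Nat) (k : String × Bool × Nat) : Nat :=
  if k.2.2 < best && pvMatch fL fT k then k.2.2 else best

-- the four priority groups of the keyword table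
def pvG0 : List (String × Bool × Nat) :=
  [("button", true, 0), ("click", false, 0), ("submit", false, 0),
   ("send", false, 0), ("ok", false, 0), ("cancel", false, 0), ("search", false, 0)]
def pvG1 : List (String × Bool × Nat) := [("link", true, 1), ("anchor", true, 1)]
def pvG2 : List (String × Bool × Nat) :=
  [("input", true, 2), ("text", true, 2), ("field", true, 2),
   ("email", false, 2), ("password", false, 2), ("username", false, 2), ("search", false, 2)]
def pvG3 : List (String × Bool × Nat) := [("checkbox", true, 3), ("radio", true, 3)]

-- over a group of keywords that all carry priority p, the min-fold returns p iff
-- p improves on init and some keyword matches, else init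
theorem pv_group_fold (fL fT : String → Bool) (p : Nat) :
    ∀ (l : List (String × Bool × Nat)), (∀ k ∈ l, k.2.2 = p) → ∀ (init : Nat),
      l.foldl (pvStep fL fT) init
        = if p < init ∧ l.any (pvMatch fL fT) = true then p else init := by
  intro l
  induction l with
  | nil => intro _ init; simp
  | cons k l ih =>
    intro hl init
    have hk : k.2.2 = p := hl k (by simp)
    have hl' : ∀ k' ∈ l, k'.2.2 = p := fun k' h => hl k' (by simp [h])
    simp only [List.foldl_cons]
    rw [ih hl']
    by_cases hm : pvMatch fL fT k = true
    · by_cases hpi : p < init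
      · have : pvStep fL fT init k = p := by simp [pvStep, hk, hm, hpi]
        rw [this]
        simp [hm, hpi]
      · have : pvStep fL fT init k = init := by simp [pvStep, hk, hpi]
        rw [this]
        simp [hpi]
    · have : pvStep fL fT init k = init := by simp [pvStep, hm]
      rw [this]
      have hany : (k :: l).any (pvMatch fL fT) = l.any (pvMatch fL fT) := by
        simp [List.any_cons, hm]
      rw [hany]

-- the whole table's min-fold versus A's four ordered branches, abstracted over
-- the two membership tests
theorem pv_classify_generic (fL fT : String → Bool) :
    (if fL "button" ||
        (["click", "submit", "send", "ok", "cancel", "search"].any (fun w => fT w)) then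
       "button"
     else if fL "link" || fL "anchor" then "link"
     else if fL "input" || fL "text" || fL "field" ||
             (["email", "password", "username", "search"].any (fun w => fT w)) then
       "textfield"
     else if fL "checkbox" || fL "radio" then "checkbox"
     else "label")
    = classifyTypes.getD (classifyKeywords.foldl (pvStep fL fT) 4) "label" := by
  have hsplit : classifyKeywords = pvG0 ++ (pvG1 ++ (pvG2 ++ pvG3)) := rfl
  rw [hsplit, List.foldl_append, List.foldl_append, List.foldl_append]
  rw [pv_group_fold fL fT 0 pvG0 (by decide)]
  rw [pv_group_fold fL fT 1 pvG1 (by decide)]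
  rw [pv_group_fold fL fT 2 pvG2 (by decide)]
  rw [pv_group_fold fL fT 3 pvG3 (by decide)]
  have e0 : (fL "button" ||
      (["click", "submit", "send", "ok", "cancel", "search"].any (fun w => fT w)))
      = pvG0.any (pvMatch fL fT) := by
    simp [pvG0, pvMatch, List.any_cons]
  have e1 : (fL "link" || fL "anchor") = pvG1.any (pvMatch fL fT) := by
    simp [pvG1, pvMatch, List.any_cons]
  have e2 : (fL "input" || fL "text" || fL "field" ||
      (["email", "password", "username", "search"].any (fun w => fT w)))
      = pvG2.any (pvMatch fL fT) := by
    simp [pvG2, pvMatch, List.any_cons, Bool.or_assoc]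
  have e3 : (fL "checkbox" || fL "radio") = pvG3.any (pvMatch fL fT) := by
    simp [pvG3, pvMatch, List.any_cons]
  rw [e0, e1, e2, e3]
  generalize pvG0.any (pvMatch fL fT) = a0
  generalize pvG1.any (pvMatch fL fT) = a1
  generalize pvG2.any (pvMatch fL fT) = a2
  generalize pvG3.any (pvMatch fL fT) = a3
  revert a0 a1 a2 a3
  decide

-- the two lowered-text computations coincide (lower "" = "")
theorem pv_text_lower_comm (text : String) :
    PySem.Str.lower (if PySem.Str.len text ≠ 0 then text else "")
      = if PySem.Str.len text ≠ 0 then PySem.Str.lower text else "" := by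
  split
  · rfl
  · decide

-- B's fold step is pvStep at the concrete membership tests
theorem pv_step_eq (L T : String) :
    (fun (best : Nat) (kft : String × Bool × Nat) =>
        if kft.2.2 < best && PySem.Str.isIn kft.1 (if kft.2.1 then L else T)
        then kft.2.2 else best)
      = pvStep (fun s => PySem.Str.isIn s L) (fun s => PySem.Str.isIn s T) := by
  funext best k
  unfold pvStep pvMatch
  cases hc : k.2.1 <;> simp

-- ===== VERDICT (by name: the statement is the Claim_ definition above) =====
theorem classify_element_type_py_spec : Claim_equal_classify_element_type_py := by
  intro label text _
  unfold Spec_classify_element_type_py classify_element_type_py classify_element_type_py_alt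
  simp only [pv_text_lower_comm, pv_step_eq]
  exact pv_classify_generic
    (fun s => PySem.Str.isIn s (PySem.Str.lower label))
    (fun s => PySem.Str.isIn s (if PySem.Str.len text ≠ 0 then PySem.Str.lower text else ""))
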